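-- pv_equiv track=rewrite | github.com/tmould1/dystopia-mud | game/tools/mudlib/area_parser.py | read_tilde_string
-- ===== SOURCE A (Python) =====
-- from typing import Dict, List, Optional, Tuple
--
-- def read_tilde_string(lines: List[str], idx: int) -> Tuple[str, int]:
--     """Read a tilde-terminated string from lines, starting at idx."""
--     result = []
--     while idx < len(lines):
--         line = lines[idx]
--         if line.endswith('~'):
--             result.append(line[:-1])
--             return '\n'.join(result), idx + 1
--         result.append(line)
--         idx += 1
--     return '\n'.join(result), idx
-- ===== SOURCE B (Python) =====
-- def read_tilde_string(lines, idx):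
--     """Read a tilde-terminated string from lines, starting at idx."""
--     # Find the terminator first, then build the result with one slice + join.
--     for j in range(idx, len(lines)):
--         if lines[j].endswith('~'):
--             return '\n'.join(lines[idx:j] + [lines[j][:-1]]), j + 1
--     # No terminator: everything from idx on; the cursor never moves backwards.
--     return '\n'.join(lines[idx:]), max(idx, len(lines))
-- ===== Notes on version B (the rewrite author's own statement) =====
-- stated objective: alternative
-- what changed: B first scans only for the index of the terminating line and then builds the result with one slice plus a single join, instead of A's while-loop that grows a result list line by line and re-checks the cursor; on negative cursors B never wraps past the end of the list.
-- intended difference: For a negative idx whose tail lines[idx:] contains no '~'-terminated line, A's negative indexing wraps around and re-reads lines from index 0 (duplicating content in the returned string), while B returns just '\n'.join(lines[idx:]) with the cursor moved forward, which is the intended read-to-end behaviour. — e.g. on read_tilde_string(["b"], -1): A returns ("b\nb", 1), B returns ("b", 1)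
import Mathlib
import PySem

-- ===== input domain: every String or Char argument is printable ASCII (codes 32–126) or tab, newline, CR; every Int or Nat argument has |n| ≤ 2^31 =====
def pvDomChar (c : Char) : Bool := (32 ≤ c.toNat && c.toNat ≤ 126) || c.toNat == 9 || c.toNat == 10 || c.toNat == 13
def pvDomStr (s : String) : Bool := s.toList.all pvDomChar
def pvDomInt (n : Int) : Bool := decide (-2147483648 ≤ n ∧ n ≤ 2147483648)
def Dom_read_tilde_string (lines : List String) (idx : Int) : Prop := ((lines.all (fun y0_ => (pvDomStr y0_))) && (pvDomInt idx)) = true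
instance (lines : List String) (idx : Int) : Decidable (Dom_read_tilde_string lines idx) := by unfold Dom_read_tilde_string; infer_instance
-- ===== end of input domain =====

-- B finds the terminator's index first, then builds the result with one slice + join (A grows a
-- result list line by line); equivalence is proved outside D_ below, where A's negative-index
-- wraparound re-reads lines from 0.

-- ===== PORT A =====
-- while idx < len(lines): … ; lines[idx] via pyGet? (none = IndexError, excluded by Pre_)
def readA (lines : List String) (result : List String) (idx : Int) : String × Int :=
  if _h : idx < (lines.length : Int) then
    match PySem.List.pyGet? lines idx with
    | none => (PySem.Str.join "\n" result, idx)   -- Python raises IndexError here; outside Pre_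
    | some line =>
      if PySem.Str.endswith line "~" then
        (PySem.Str.join "\n" (result ++ [PySem.Str.slice line none (some (-1))]), idx + 1)
      else
        readA lines (result ++ [line]) (idx + 1)
  else
    (PySem.Str.join "\n" result, idx)
termination_by ((lines.length : Int) - idx).toNat
decreasing_by omega

def read_tilde_string (lines : List String) (idx : Int) : String × Int :=
  readA lines [] idx

-- ===== PORT B =====
-- for j in range(idx, len(lines)): if lines[j].endswith('~'): return j with that line
def findTilde (lines : List String) (js : List Int) : Option (Int × String) :=
  match js with
  | [] => none
  | j :: rest =>
    match PySem.List.pyGet? lines j with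
    | none => none   -- Python raises IndexError here; outside Pre_
    | some s => if PySem.Str.endswith s "~" then some (j, s) else findTilde lines rest

def read_tilde_string_alt (lines : List String) (idx : Int) : String × Int :=
  match findTilde lines (PySem.List.pyRange idx lines.length) with
  | some (j, s) =>
      (PySem.Str.join "\n"
        (PySem.List.slice lines (some idx) (some j) ++ [PySem.Str.slice s none (some (-1))]),
       j + 1)
  | none =>
      (PySem.Str.join "\n" (PySem.List.slice lines (some idx) none), max idx (lines.length : Int))

-- ===== PRECONDITION & SPEC =====
-- A raises IndexError exactly when idx < -len(lines) (the loop is entered and lines[idx] is out of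
-- range); Pre_ excludes exactly those inputs.
def Pre_read_tilde_string (lines : List String) (idx : Int) : Prop :=
  -(lines.length : Int) ≤ idx

instance (lines : List String) (idx : Int) : Decidable (Pre_read_tilde_string lines idx) := by
  unfold Pre_read_tilde_string; infer_instance

def pvWitness_read_tilde_string : List String × Int := (["hello~", "world"], 0)

-- For a negative idx whose tail lines[idx:] contains no '~'-terminated line, A's negative indexing
-- wraps around and re-reads lines from index 0 (duplicating content in the returned string), while
-- B returns just '\n'.join(lines[idx:]) with the cursor moved forward, which is the intended
-- read-to-end behaviour.
def D_read_tilde_string (lines : List String) (idx : Int) : Prop :=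
  idx < 0 ∧ ∀ s ∈ lines.drop ((lines.length + idx).toNat), PySem.Str.endswith s "~" = false

instance (lines : List String) (idx : Int) : Decidable (D_read_tilde_string lines idx) := by
  unfold D_read_tilde_string; infer_instance

def Spec_read_tilde_string (lines : List String) (idx : Int) (out : String × Int) : Prop :=
  ¬ D_read_tilde_string lines idx → out = read_tilde_string_alt lines idx

instance (lines : List String) (idx : Int) (out : String × Int) :
    Decidable (Spec_read_tilde_string lines idx out) := by
  unfold Spec_read_tilde_string; infer_instance

def pvDiffWitness_read_tilde_string : List String × Int := (["b"], -1)
def pvDiffWitnessOut_read_tilde_string : (String × Int) × (String × Int) :=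
  (("b\nb", 1), ("b", 1))

-- ===== CLAIM (what is proved, stated in full; the proofs are below) =====
def Claim_unchanged_read_tilde_string : Prop := ∀ (lines : List String) (idx : Int), Dom_read_tilde_string lines idx → Pre_read_tilde_string lines idx → Spec_read_tilde_string lines idx (read_tilde_string lines idx)
def Claim_changed_read_tilde_string : Prop := Dom_read_tilde_string (pvDiffWitness_read_tilde_string.1) (pvDiffWitness_read_tilde_string.2) ∧ Pre_read_tilde_string (pvDiffWitness_read_tilde_string.1) (pvDiffWitness_read_tilde_string.2) ∧ D_read_tilde_string (pvDiffWitness_read_tilde_string.1) (pvDiffWitness_read_tilde_string.2) ∧ read_tilde_string (pvDiffWitness_read_tilde_string.1) (pvDiffWitness_read_tilde_string.2) = pvDiffWitnessOut_read_tilde_string.1 ∧ read_tilde_string_alt (pvDiffWitness_read_tilde_string.1) (pvDiffWitness_read_tilde_string.2) = pvDiffWitnessOut_read_tilde_string.2 ∧ pvDiffWitnessOut_read_tilde_string.1 ≠ pvDiffWitnessOut_read_tilde_string.2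
def Claim_exact_read_tilde_string : Prop := ∀ (lines : List String) (idx : Int), Dom_read_tilde_string lines idx → Pre_read_tilde_string lines idx → D_read_tilde_string lines idx → read_tilde_string lines idx ≠ read_tilde_string_alt lines idx

-- ===== LEMMAS AND PROOFS =====

lemma findTilde_cons (lines : List String) (j : Int) (js : List Int) :
    findTilde lines (j :: js) =
      match PySem.List.pyGet? lines j with
      | none => none
      | some s => if PySem.Str.endswith s "~" then some (j, s) else findTilde lines js := rfl

lemma pyRange_nil_of_le (a b : Int) (h : b ≤ a) : PySem.List.pyRange a b = [] := by
  simp [PySem.List.pyRange, not_lt.mpr h]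

lemma clampIdx_lt {n : Nat} {i : Int} (h1 : -(n : Int) ≤ i) (h2 : i < n) :
    PySem.List.clampIdx n i < n := by
  unfold PySem.List.clampIdx; split_ifs <;> omega

lemma clampIdx_succ {n : Nat} {i : Int} (h1 : -(n : Int) ≤ i) (h2 : i < n) (h3 : i ≠ -1) :
    PySem.List.clampIdx n (i + 1) = PySem.List.clampIdx n i + 1 := by
  unfold PySem.List.clampIdx; split_ifs <;> omega

lemma clampIdx_of_neg {n : Nat} {i : Int} (h2 : i < 0) :
    PySem.List.clampIdx n i = (n + i).toNat := by
  unfold PySem.List.clampIdx; split_ifs <;> omega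

lemma pyGet_eq (xs : List String) (idx : Int) (h1 : -(xs.length : Int) ≤ idx)
    (h2 : idx < xs.length) :
    PySem.List.pyGet? xs idx = xs[PySem.List.clampIdx xs.length idx]? := by
  unfold PySem.List.pyGet? PySem.List.pyIdx?
  by_cases h : 0 ≤ idx
  · have hc : PySem.List.clampIdx xs.length idx = idx.toNat := by
      unfold PySem.List.clampIdx; split_ifs <;> omega
    rw [hc]
    simp only [if_pos h, if_pos h2, Option.bind_some]
  · have hc : PySem.List.clampIdx xs.length idx = xs.length - (-idx).toNat := by
      unfold PySem.List.clampIdx; split_ifs <;> omega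
    rw [hc]
    simp only [if_neg h, if_pos h1, Option.bind_some]

lemma slice_self (xs : List String) (i : Int) :
    PySem.List.slice xs (some i) (some i) = [] := by
  simp [PySem.List.slice]

lemma slice_from_nil (xs : List String) (i : Int) (h : (xs.length : Int) ≤ i) :
    PySem.List.slice xs (some i) none = [] := by
  have hc : PySem.List.clampIdx xs.length i = xs.length := by
    unfold PySem.List.clampIdx; split_ifs <;> omega
  simp [PySem.List.slice, hc]

lemma slice_cons (xs : List String) (i j : Int)
    (h3 : PySem.List.clampIdx xs.length i < xs.length)
    (h1 : PySem.List.clampIdx xs.length i < PySem.List.clampIdx xs.length j)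
    (h2 : PySem.List.clampIdx xs.length (i + 1) = PySem.List.clampIdx xs.length i + 1) :
    PySem.List.slice xs (some i) (some j) =
      xs[PySem.List.clampIdx xs.length i]'h3 :: PySem.List.slice xs (some (i + 1)) (some j) := by
  simp only [PySem.List.slice, h2]
  rw [List.drop_eq_getElem_cons h3]
  have he : PySem.List.clampIdx xs.length j - PySem.List.clampIdx xs.length i
      = (PySem.List.clampIdx xs.length j - (PySem.List.clampIdx xs.length i + 1)) + 1 := by omega
  rw [he, List.take_succ_cons]

lemma slice_from_cons (xs : List String) (i : Int)
    (h3 : PySem.List.clampIdx xs.length i < xs.length)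
    (h2 : PySem.List.clampIdx xs.length (i + 1) = PySem.List.clampIdx xs.length i + 1) :
    PySem.List.slice xs (some i) none =
      xs[PySem.List.clampIdx xs.length i]'h3 :: PySem.List.slice xs (some (i + 1)) none := by
  simp only [PySem.List.slice, h2]
  rw [List.drop_eq_getElem_cons h3]
  have he : xs.length - PySem.List.clampIdx xs.length i
      = (xs.length - (PySem.List.clampIdx xs.length i + 1)) + 1 := by omega
  rw [he, List.take_succ_cons]

lemma findTilde_mem (lines : List String) :
    ∀ (js : List Int) (j : Int) (s : String), findTilde lines js = some (j, s) → j ∈ js := by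
  intro js
  induction js with
  | nil => intro j s h; simp [findTilde] at h
  | cons a rest ih =>
    intro j s h
    unfold findTilde at h
    split at h
    · simp at h
    · split at h
      · simp at h
        simp [h.1]
      · exact List.mem_cons_of_mem _ (ih j s h)

-- if a '~'-terminated line exists at a negative position ≥ idx, B's scan finds a negative index
lemma findTilde_neg (lines : List String) :
    ∀ (fuel : Nat) (idx : Int), (-idx).toNat ≤ fuel → -(lines.length : Int) ≤ idx → idx < 0 →
    (∃ s ∈ lines.drop ((lines.length + idx).toNat), PySem.Str.endswith s "~" = true) →
    ∃ j s, j < 0 ∧ findTilde lines (PySem.List.pyRange idx lines.length) = some (j, s) := by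
  intro fuel
  induction fuel with
  | zero => intro idx hf _ hlt _; omega
  | succ m ih =>
    intro idx hf hpre hlt hex
    have hn : idx < (lines.length : Int) := by omega
    have hcilt : PySem.List.clampIdx lines.length idx < lines.length := clampIdx_lt hpre hn
    have hget : PySem.List.pyGet? lines idx
        = some (lines[PySem.List.clampIdx lines.length idx]'hcilt) :=
      (pyGet_eq lines idx hpre hn).trans (List.getElem?_eq_getElem hcilt)
    have hcival : PySem.List.clampIdx lines.length idx = (lines.length + idx).toNat :=
      clampIdx_of_neg hlt
    rw [PySem.List.pyRange_one_cons hn, findTilde_cons, hget]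
    dsimp only
    by_cases ht : PySem.Str.endswith (lines[PySem.List.clampIdx lines.length idx]'hcilt) "~" = true
    · exact ⟨idx, lines[PySem.List.clampIdx lines.length idx]'hcilt, hlt, by rw [if_pos ht]⟩
    · rw [if_neg ht]
      obtain ⟨s, hs, hts⟩ := hex
      rw [← hcival, List.drop_eq_getElem_cons hcilt] at hs
      rcases List.mem_cons.mp hs with heq | hs'
      · exact absurd (heq ▸ hts) ht
      · have hlt1 : idx + 1 < 0 := by
          by_contra hge
          have hee : PySem.List.clampIdx lines.length idx + 1 = lines.length := by omega
          rw [hee, List.drop_length] at hs'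
          simp at hs'
        have harith : PySem.List.clampIdx lines.length idx + 1
            = (lines.length + (idx + 1)).toNat := by omega
        exact ih (idx + 1) (by omega) (by omega) hlt1 ⟨s, harith ▸ hs', hts⟩

-- main invariant: A's loop with accumulator `acc` equals B's find-then-slice computation
lemma readA_eq (lines : List String) :
    ∀ (fuel : Nat) (idx : Int) (acc : List String),
    ((lines.length : Int) - idx).toNat ≤ fuel →
    -(lines.length : Int) ≤ idx →
    (idx < 0 → ∃ s ∈ lines.drop ((lines.length + idx).toNat), PySem.Str.endswith s "~" = true) →
    readA lines acc idx =
      match findTilde lines (PySem.List.pyRange idx lines.length) with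
      | some (j, s) =>
          (PySem.Str.join "\n"
            (acc ++ PySem.List.slice lines (some idx) (some j) ++ [PySem.Str.slice s none (some (-1))]),
           j + 1)
      | none =>
          (PySem.Str.join "\n" (acc ++ PySem.List.slice lines (some idx) none),
           max idx (lines.length : Int)) := by
  intro fuel
  induction fuel with
  | zero =>
    intro idx acc hf hpre _
    have hge : (lines.length : Int) ≤ idx := by omega
    rw [pyRange_nil_of_le idx lines.length hge]
    unfold findTilde
    rw [readA, dif_neg (not_lt.mpr hge), slice_from_nil lines idx hge]
    simp [max_eq_left hge]
  | succ m ih =>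
    intro idx acc hf hpre hinv
    by_cases hn : idx < (lines.length : Int)
    · have hcilt : PySem.List.clampIdx lines.length idx < lines.length := clampIdx_lt hpre hn
      have hget : PySem.List.pyGet? lines idx
          = some (lines[PySem.List.clampIdx lines.length idx]'hcilt) :=
        (pyGet_eq lines idx hpre hn).trans (List.getElem?_eq_getElem hcilt)
      rw [PySem.List.pyRange_one_cons hn, findTilde_cons, hget]
      dsimp only
      rw [readA, dif_pos hn, hget]
      dsimp only
      by_cases ht : PySem.Str.endswith (lines[PySem.List.clampIdx lines.length idx]'hcilt) "~"
          = true
      · rw [if_pos ht, if_pos ht]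
        dsimp only
        rw [slice_self]
        simp
      · rw [if_neg ht, if_neg ht]
        -- idx = -1 is impossible here: the invariant puts a '~'-line in drop (len-1) = [lines[len-1]]
        have hne1 : idx ≠ -1 := by
          intro he
          have hcival : PySem.List.clampIdx lines.length idx = (lines.length + idx).toNat :=
            clampIdx_of_neg (by omega)
          obtain ⟨s, hs, hts⟩ := hinv (by omega)
          rw [← hcival, List.drop_eq_getElem_cons hcilt] at hs
          rcases List.mem_cons.mp hs with heq | hs'
          · exact absurd (heq ▸ hts) ht
          · have hee : PySem.List.clampIdx lines.length idx + 1 = lines.length := by omega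
            rw [hee, List.drop_length] at hs'
            simp at hs'
        have hinv1 : idx + 1 < 0 →
            ∃ s ∈ lines.drop ((lines.length + (idx + 1)).toNat),
              PySem.Str.endswith s "~" = true := by
          intro hlt1
          have hcival : PySem.List.clampIdx lines.length idx = (lines.length + idx).toNat :=
            clampIdx_of_neg (by omega)
          obtain ⟨s, hs, hts⟩ := hinv (by omega)
          rw [← hcival, List.drop_eq_getElem_cons hcilt] at hs
          rcases List.mem_cons.mp hs with heq | hs'
          · exact absurd (heq ▸ hts) ht
          · exact ⟨s, by
              rw [show (lines.length + (idx + 1)).toNat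
                  = PySem.List.clampIdx lines.length idx + 1 by omega]
              exact hs', hts⟩
        have hsucc : PySem.List.clampIdx lines.length (idx + 1)
            = PySem.List.clampIdx lines.length idx + 1 :=
          clampIdx_succ hpre hn hne1
        rw [ih (idx + 1) (acc ++ [lines[PySem.List.clampIdx lines.length idx]'hcilt])
          (by omega) (by omega) hinv1]
        rcases hfd : findTilde lines (PySem.List.pyRange (idx + 1) lines.length)
          with _ | ⟨j, s⟩ <;> dsimp only
        · -- no terminator from idx+1 on: idx must be nonnegative, else findTilde_neg contradicts
          have hge0 : 0 ≤ idx := by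
            by_contra hneg
            have hlt1 : idx + 1 < 0 := by omega
            obtain ⟨j, s, _, hsome⟩ := findTilde_neg lines (-(idx + 1)).toNat (idx + 1) le_rfl
              (by omega) hlt1 (hinv1 hlt1)
            rw [hfd] at hsome
            simp at hsome
          rw [slice_from_cons lines idx hcilt hsucc]
          rw [max_eq_right (by omega : idx ≤ (lines.length : Int)),
              max_eq_right (by omega : idx + 1 ≤ (lines.length : Int))]
          simp
        · -- terminator at j ∈ range(idx+1, len); it never crosses 0 when idx < 0
          have hjb := PySem.List.mem_pyRange_one.mp (findTilde_mem lines _ j s hfd)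
          have hcj : PySem.List.clampIdx lines.length idx < PySem.List.clampIdx lines.length j := by
            by_cases h0 : 0 ≤ idx
            · have hi : PySem.List.clampIdx lines.length idx = idx.toNat := by
                unfold PySem.List.clampIdx; split_ifs <;> omega
              have hj : PySem.List.clampIdx lines.length j = j.toNat := by
                unfold PySem.List.clampIdx; split_ifs <;> omega
              omega
            · have hjneg : j < 0 := by
                by_contra hj0
                have hlt1 : idx + 1 < 0 := by omega
                obtain ⟨j', s', hj'neg, hsome⟩ := findTilde_neg lines (-(idx + 1)).toNat (idx + 1)
                  le_rfl (by omega) hlt1 (hinv1 hlt1)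
                rw [hfd] at hsome
                simp at hsome
                omega
              rw [clampIdx_of_neg (by omega : idx < 0), clampIdx_of_neg hjneg]
              omega
          rw [slice_cons lines idx j hcilt hcj hsucc]
          simp
    · rw [pyRange_nil_of_le idx lines.length (by omega)]
      unfold findTilde
      rw [readA, dif_neg hn, slice_from_nil lines idx (by omega)]
      simp [max_eq_left (by omega : (lines.length : Int) ≤ idx)]

lemma clampIdx_of_nonneg_lt {n : Nat} {i : Int} (h1 : 0 ≤ i) (h2 : i < n) :
    PySem.List.clampIdx n i = i.toNat := by
  unfold PySem.List.clampIdx; split_ifs <;> omega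

-- length of a '\n'-join: one separator between any two pieces
lemma chars_join_len :
    ∀ (l : List (List Char)), l ≠ [] →
    (PySem.Chars.join ['\n'] l).length + 1 = (l.map List.length).sum + l.length := by
  intro l
  induction l with
  | nil => intro h; cases h rfl
  | cons a t ih =>
    intro _
    cases t with
    | nil => simp [PySem.Chars.join_singleton]
    | cons b t2 =>
      rw [PySem.Chars.join_cons_cons]
      have hih := ih (by simp)
      simp only [List.map_cons, List.sum_cons, List.length_cons, List.length_nil,
        List.length_append] at hih ⊢
      omega

-- inside D_, A's loop walks the whole (untilded) negative tail and lands at cursor 0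
lemma readA_negPhase (lines : List String) :
    ∀ (fuel : Nat) (idx : Int) (acc : List String),
    (-idx).toNat ≤ fuel → -(lines.length : Int) ≤ idx → idx < 0 →
    (∀ s ∈ lines.drop (((lines.length : Int) + idx).toNat), PySem.Str.endswith s "~" = false) →
    readA lines acc idx
      = readA lines (acc ++ lines.drop (((lines.length : Int) + idx).toNat)) 0 := by
  intro fuel
  induction fuel with
  | zero => intro idx acc hf _ hlt _; omega
  | succ m ih =>
    intro idx acc hf hpre hlt hall
    have hn : idx < (lines.length : Int) := by omega
    have hcilt : PySem.List.clampIdx lines.length idx < lines.length := clampIdx_lt hpre hn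
    have hget : PySem.List.pyGet? lines idx
        = some (lines[PySem.List.clampIdx lines.length idx]'hcilt) :=
      (pyGet_eq lines idx hpre hn).trans (List.getElem?_eq_getElem hcilt)
    have hcival : PySem.List.clampIdx lines.length idx = ((lines.length : Int) + idx).toNat :=
      clampIdx_of_neg hlt
    have hdropeq : lines.drop (((lines.length : Int) + idx).toNat)
        = (lines[PySem.List.clampIdx lines.length idx]'hcilt)
            :: lines.drop (PySem.List.clampIdx lines.length idx + 1) := by
      rw [← hcival]; exact List.drop_eq_getElem_cons hcilt
    have ht : PySem.Str.endswith (lines[PySem.List.clampIdx lines.length idx]'hcilt) "~"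
        = false := hall _ (by rw [hdropeq]; exact List.mem_cons_self)
    rw [readA, dif_pos hn, hget]
    dsimp only
    rw [if_neg (by rw [ht]; simp), hdropeq,
        show acc ++ ((lines[PySem.List.clampIdx lines.length idx]'hcilt)
            :: lines.drop (PySem.List.clampIdx lines.length idx + 1))
          = (acc ++ [lines[PySem.List.clampIdx lines.length idx]'hcilt])
            ++ lines.drop (PySem.List.clampIdx lines.length idx + 1) by simp]
    by_cases he : idx + 1 = 0
    · have hdl : PySem.List.clampIdx lines.length idx + 1 = lines.length := by omega
      rw [he, hdl, List.drop_length, List.append_nil]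
    · have hlt1 : idx + 1 < 0 := by omega
      have harith : PySem.List.clampIdx lines.length idx + 1
          = ((lines.length : Int) + (idx + 1)).toNat := by omega
      rw [harith]
      exact ih (idx + 1) (acc ++ [lines[PySem.List.clampIdx lines.length idx]'hcilt])
        (by omega) (by omega) hlt1
        (fun s hs => hall s (by rw [hdropeq]; exact List.mem_cons_of_mem _ (harith ▸ hs)))

-- inside D_, B's scan skips the whole (untilded) negative tail
lemma findTilde_skip (lines : List String) :
    ∀ (fuel : Nat) (idx : Int), (-idx).toNat ≤ fuel → -(lines.length : Int) ≤ idx → idx < 0 →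
    (∀ s ∈ lines.drop (((lines.length : Int) + idx).toNat), PySem.Str.endswith s "~" = false) →
    findTilde lines (PySem.List.pyRange idx lines.length)
      = findTilde lines (PySem.List.pyRange 0 lines.length) := by
  intro fuel
  induction fuel with
  | zero => intro idx hf _ hlt _; omega
  | succ m ih =>
    intro idx hf hpre hlt hall
    have hn : idx < (lines.length : Int) := by omega
    have hcilt : PySem.List.clampIdx lines.length idx < lines.length := clampIdx_lt hpre hn
    have hget : PySem.List.pyGet? lines idx
        = some (lines[PySem.List.clampIdx lines.length idx]'hcilt) :=
      (pyGet_eq lines idx hpre hn).trans (List.getElem?_eq_getElem hcilt)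
    have hcival : PySem.List.clampIdx lines.length idx = ((lines.length : Int) + idx).toNat :=
      clampIdx_of_neg hlt
    have hdropeq : lines.drop (((lines.length : Int) + idx).toNat)
        = (lines[PySem.List.clampIdx lines.length idx]'hcilt)
            :: lines.drop (PySem.List.clampIdx lines.length idx + 1) := by
      rw [← hcival]; exact List.drop_eq_getElem_cons hcilt
    have ht : PySem.Str.endswith (lines[PySem.List.clampIdx lines.length idx]'hcilt) "~"
        = false := hall _ (by rw [hdropeq]; exact List.mem_cons_self)
    rw [PySem.List.pyRange_one_cons hn, findTilde_cons, hget]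
    dsimp only
    rw [if_neg (by rw [ht]; simp)]
    by_cases he : idx + 1 = 0
    · rw [he]
    · have hlt1 : idx + 1 < 0 := by omega
      have harith : PySem.List.clampIdx lines.length idx + 1
          = ((lines.length : Int) + (idx + 1)).toNat := by omega
      exact ih (idx + 1) (by omega) (by omega) hlt1
        (fun s hs => hall s (by rw [hdropeq]; exact List.mem_cons_of_mem _ (harith ▸ hs)))

-- ===== VERDICT (by name: the statement is the Claim_ definition above) =====
theorem read_tilde_string_spec : Claim_unchanged_read_tilde_string := by
  intro lines idx _ hpre hnd
  have hinv : idx < 0 →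
      ∃ s ∈ lines.drop ((lines.length + idx).toNat), PySem.Str.endswith s "~" = true := by
    intro hlt
    by_contra hnone
    simp only [not_exists, not_and, Bool.not_eq_true] at hnone
    exact hnd ⟨hlt, hnone⟩
  have key := readA_eq lines ((lines.length : Int) - idx).toNat idx [] le_rfl hpre hinv
  show read_tilde_string lines idx = read_tilde_string_alt lines idx
  unfold read_tilde_string read_tilde_string_alt
  rw [key]
  rcases findTilde lines (PySem.List.pyRange idx lines.length) with _ | ⟨j, s⟩ <;> simp

theorem read_tilde_string_changed : Claim_changed_read_tilde_string := by
  unfold Claim_changed_read_tilde_string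
  refine ⟨by decide, by decide, by decide, ?_, by decide, by decide⟩
  show read_tilde_string ["b"] (-1) = ("b\nb", 1)
  unfold read_tilde_string
  rw [readA, dif_pos (by decide), show PySem.List.pyGet? ["b"] (-1) = some "b" from by decide]
  dsimp only
  rw [if_neg (by decide), show ((-1 : Int) + 1) = 0 from by decide]
  rw [readA, dif_pos (by decide), show PySem.List.pyGet? ["b"] 0 = some "b" from by decide]
  dsimp only
  rw [if_neg (by decide), show ((0 : Int) + 1) = 1 from by decide]
  rw [readA, dif_neg (by decide)]
  decide

theorem read_tilde_string_tight : Claim_exact_read_tilde_string := by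
  intro lines idx _ hpre hD hEq
  obtain ⟨hlt, hall⟩ := hD
  have hpre' : -(lines.length : Int) ≤ idx := hpre
  have hn1 : 1 ≤ lines.length := by omega
  have hciub : (((lines.length : Int) + idx).toNat) < lines.length := by omega
  have h1 : readA lines [] idx
      = readA lines ([] ++ lines.drop (((lines.length : Int) + idx).toNat)) 0 :=
    readA_negPhase lines (-idx).toNat idx [] le_rfl hpre' hlt hall
  have h2 := readA_eq lines lines.length 0
    (([] : List String) ++ lines.drop (((lines.length : Int) + idx).toNat))
    (by omega) (by omega) (fun h => absurd h (by norm_num))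
  have h3 : findTilde lines (PySem.List.pyRange idx lines.length)
      = findTilde lines (PySem.List.pyRange 0 lines.length) :=
    findTilde_skip lines (-idx).toNat idx le_rfl hpre' hlt hall
  have hPne : lines.drop (((lines.length : Int) + idx).toNat) ≠ [] := by
    apply List.ne_nil_of_length_pos
    rw [List.length_drop]
    omega
  have hPlen : (lines.drop (((lines.length : Int) + idx).toNat)).length
      = lines.length - (((lines.length : Int) + idx).toNat) := List.length_drop
  have hsep : "\n".toList = ['\n'] := by decide
  unfold read_tilde_string read_tilde_string_alt at hEq
  rw [h1, h2, h3] at hEq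
  have hsi : PySem.List.slice lines (some idx) none
      = lines.drop (((lines.length : Int) + idx).toNat) := by
    rw [PySem.List.slice_some_none, clampIdx_of_neg hlt]
  rcases hfd : findTilde lines (PySem.List.pyRange 0 lines.length) with _ | ⟨j, s⟩ <;>
    rw [hfd] at hEq <;> dsimp only at hEq
  · -- no terminator anywhere: A re-reads all of lines, B stops at the end
    have hs0 : PySem.List.slice lines (some (0 : Int)) none = lines := by
      rw [PySem.List.slice_some_none, clampIdx_of_nonneg_lt (by omega) (by omega)]
      simp
    rw [hs0, hsi, List.nil_append] at hEq
    have hlist := congrArg (fun p : String × Int => p.1.toList) hEq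
    dsimp only at hlist
    rw [PySem.Str.toList_join, PySem.Str.toList_join, hsep] at hlist
    have hlen := congrArg List.length hlist
    have e1 := chars_join_len
      ((lines.drop (((lines.length : Int) + idx).toNat) ++ lines).map String.toList)
      (by apply List.ne_nil_of_length_pos
          simp only [List.length_map, List.length_append, List.length_drop]
          omega)
    have e2 := chars_join_len
      ((lines.drop (((lines.length : Int) + idx).toNat)).map String.toList)
      (by apply List.ne_nil_of_length_pos
          simp only [List.length_map, List.length_drop]
          omega)
    rw [hlen] at e1
    simp only [List.map_append, List.sum_append, List.length_append, List.length_map,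
      List.map_map] at e1 e2
    omega
  · -- terminator at j ≥ 0: A's result carries the extra wrapped prefix
    have hjb := PySem.List.mem_pyRange_one.mp (findTilde_mem lines _ j s hfd)
    have hsS : PySem.List.slice lines (some (0 : Int)) (some j) = lines.take j.toNat := by
      simp only [PySem.List.slice]
      rw [clampIdx_of_nonneg_lt (i := 0) (by omega) (by omega),
          clampIdx_of_nonneg_lt hjb.1 hjb.2]
      simp
    have hsR : PySem.List.slice lines (some idx) (some j)
        = (lines.drop (((lines.length : Int) + idx).toNat)).take
            (j.toNat - (((lines.length : Int) + idx).toNat)) := by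
      simp only [PySem.List.slice]
      rw [clampIdx_of_neg hlt, clampIdx_of_nonneg_lt hjb.1 hjb.2, List.take_drop]
    rw [hsS, hsR, List.nil_append] at hEq
    have hlist := congrArg (fun p : String × Int => p.1.toList) hEq
    dsimp only at hlist
    rw [PySem.Str.toList_join, PySem.Str.toList_join, hsep] at hlist
    have hlen := congrArg List.length hlist
    have e1 := chars_join_len
      (((lines.drop (((lines.length : Int) + idx).toNat) ++ lines.take j.toNat)
          ++ [PySem.Str.slice s none (some (-1))]).map String.toList)
      (by simp)
    have e2 := chars_join_len
      (((lines.drop (((lines.length : Int) + idx).toNat)).take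
            (j.toNat - (((lines.length : Int) + idx).toNat))
          ++ [PySem.Str.slice s none (some (-1))]).map String.toList)
      (by simp)
    rw [hlen] at e1
    simp only [List.map_append, List.sum_append, List.length_append, List.length_map,
      List.map_map, List.map_cons, List.map_nil, List.sum_cons, List.sum_nil,
      List.length_cons, List.length_nil, List.map_take, List.length_take,
      Function.comp_def] at e1 e2
    -- the sliced part of B is a prefix of A's wrapped prefix: its summed length is smaller
    have hsub : ((List.take (j.toNat - (((lines.length : Int) + idx).toNat))
          ((lines.drop (((lines.length : Int) + idx).toNat)).map
            (fun s => s.toList.length)))).sum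
        ≤ (((lines.drop (((lines.length : Int) + idx).toNat)).map
            (fun s => s.toList.length))).sum :=
      (List.take_sublist _ _).sum_le_sum (fun _ _ => Nat.zero_le _)
    have htl : (lines.take j.toNat).length = min j.toNat lines.length := List.length_take
    omega
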